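-- pv_equiv track=rewrite | github.com/sweetalyssum/Seq2Seq-DU | seq2seq/data_utils.py | _get_token_char_range
-- ===== SOURCE A (Python) =====
-- def _get_token_char_range(utt_tok):
--   """Get starting and end character positions of each token in utt_tok."""
--   char_pos = 0
--   # List of (start_char_pos, end_char_pos) for each token in utt_tok.
--   utt_char_range = []
--   for tok in utt_tok:
--     start = char_pos
--     end = start + len(tok) - 1
--     utt_char_range.append((start, end))
--     char_pos = end + 1
--   return utt_char_range
-- ===== SOURCE B (Python) =====
-- def _get_token_char_range(utt_tok):
--   """Get starting and end character positions of each token in utt_tok."""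
--   starts = [0]
--   for tok in utt_tok:
--     starts.append(starts[-1] + len(tok))
--   return [(s, s + len(tok) - 1) for s, tok in zip(starts, utt_tok)]
-- ===== Notes on version B (the rewrite author's own statement) =====
-- stated objective: alternative
-- what changed: B first builds a prefix-sum table of all start offsets, then a second zip/comprehension pass emits (start, start+len-1) per token, instead of A's single loop that threads a running char_pos and appends while iterating.
import Mathlib
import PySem

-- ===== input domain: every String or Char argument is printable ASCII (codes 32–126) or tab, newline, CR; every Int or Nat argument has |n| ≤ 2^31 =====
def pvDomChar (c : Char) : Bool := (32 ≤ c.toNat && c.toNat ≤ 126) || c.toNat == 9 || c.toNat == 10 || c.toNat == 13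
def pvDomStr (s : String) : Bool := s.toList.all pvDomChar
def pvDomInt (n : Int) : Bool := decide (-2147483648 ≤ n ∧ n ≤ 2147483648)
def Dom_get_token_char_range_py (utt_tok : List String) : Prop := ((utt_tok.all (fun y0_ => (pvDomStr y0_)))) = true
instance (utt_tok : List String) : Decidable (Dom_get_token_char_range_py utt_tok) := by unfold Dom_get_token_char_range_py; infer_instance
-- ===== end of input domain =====

-- B builds a prefix-sum table of start offsets first, then emits (start, start+len-1) per token in a second pass (alternative decomposition, same cost).
-- ===== PORT A =====
def get_token_char_range_py (utt_tok : List String) : List (Int × Int) :=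
  (utt_tok.foldl (fun (st : Int × List (Int × Int)) tok =>
      let start := st.1
      let e := start + PySem.Str.len tok - 1
      (e + 1, st.2 ++ [(start, e)])) (0, [])).2

-- ===== PORT B =====
def get_token_char_range_py_alt (utt_tok : List String) : List (Int × Int) :=
  let starts : List Int :=
    utt_tok.foldl (fun st tok => st ++ [(st.getLast?.getD 0) + PySem.Str.len tok]) [0]
  (starts.zip utt_tok).map (fun p => (p.1, p.1 + PySem.Str.len p.2 - 1))

-- ===== PRECONDITION & SPEC =====
def Spec_get_token_char_range_py (utt_tok : List String) (out : List (Int × Int)) : Prop := out = get_token_char_range_py_alt utt_tok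
instance (utt_tok : List String) (out : List (Int × Int)) : Decidable (Spec_get_token_char_range_py utt_tok out) := by unfold Spec_get_token_char_range_py; infer_instance

-- ===== CLAIM (what is proved, stated in full; the proofs are below) =====
def Claim_equal_get_token_char_range_py : Prop := ∀ (utt_tok : List String), Dom_get_token_char_range_py utt_tok → Spec_get_token_char_range_py utt_tok (get_token_char_range_py utt_tok)

-- ===== LEMMAS AND PROOFS =====

-- spec c utt: the ranges starting at offset c (reference shape for both ports)
def pvSpec (c : Int) : List String → List (Int × Int)
  | [] => []
  | t :: ts => (c, c + PySem.Str.len t - 1) :: pvSpec (c + PySem.Str.len t) ts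

def pvStarts (c : Int) : List Int → List Int
  | [] => [c]
  | l :: ls => c :: pvStarts (c + l) ls

theorem pvA_aux (utt : List String) : ∀ (c : Int) (acc : List (Int × Int)),
    (utt.foldl (fun (st : Int × List (Int × Int)) tok =>
      let start := st.1
      let e := start + PySem.Str.len tok - 1
      (e + 1, st.2 ++ [(start, e)])) (c, acc)).2 = acc ++ pvSpec c utt := by
  induction utt with
  | nil => intro c acc; simp [pvSpec]
  | cons t ts ih =>
    intro c acc
    simp only [List.foldl, pvSpec]
    rw [ih]
    simp

theorem pvB_aux (utt : List String) : ∀ (pre : List Int) (c : Int),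
    utt.foldl (fun st tok => st ++ [(st.getLast?.getD 0) + PySem.Str.len tok]) (pre ++ [c])
      = pre ++ pvStarts c (utt.map PySem.Str.len) := by
  induction utt with
  | nil => intro pre c; simp [pvStarts]
  | cons t ts ih =>
    intro pre c
    simp only [List.foldl, List.map, pvStarts]
    have h : (pre ++ [c]).getLast?.getD 0 = c := by simp
    rw [h, List.append_assoc]
    have := ih (pre ++ [c]) (c + PySem.Str.len t)
    simpa using this

theorem pvZip (utt : List String) : ∀ (c : Int),
    ((pvStarts c (utt.map PySem.Str.len)).zip utt).map
      (fun p => (p.1, p.1 + PySem.Str.len p.2 - 1)) = pvSpec c utt := by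
  induction utt with
  | nil => intro c; simp [pvStarts, pvSpec]
  | cons t ts ih =>
    intro c
    simp only [List.map, pvStarts, List.zip_cons_cons, pvSpec, ih]

-- ===== VERDICT (by name: the statement is the Claim_ definition above) =====
theorem get_token_char_range_py_spec : Claim_equal_get_token_char_range_py := by
  intro utt _
  unfold Spec_get_token_char_range_py get_token_char_range_py get_token_char_range_py_alt
  rw [pvA_aux utt 0 []]
  have hB := pvB_aux utt [] 0
  simp only [List.nil_append] at hB
  rw [hB, pvZip]
  simp
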